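-- pv_equiv track=rewrite | github.com/SriramPingali/CSE-IIT-Patna | Sem-8/CS563 - NLP/ATP/1801cs37_1801cs35_assignment_01/pos_tagger.py | compute_known
-- ===== SOURCE A (Python) =====
-- rare_word_max = 5
--
-- def compute_known(brown_words):
--     known_words = set([])
--
--     word_count = {}
--
--     for item in brown_words:
--         for word in item:
--             if word not in word_count:
--                 word_count[word] = 1
--             else:
--                 word_count[word] += 1
--
--     for item in word_count:
--         if word_count[item] > rare_word_max:
--             known_words.add(item)
--
--     return(known_words)
-- ===== SOURCE B (Python) =====
-- rare_word_max = 5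
--
-- def compute_known(brown_words):
--     flat = [w for item in brown_words for w in item]
--     seen = set()
--     known = []
--     for w in flat:
--         if w not in seen:
--             seen.add(w)
--             if flat.count(w) > rare_word_max:
--                 known.append(w)
--     return set(known)
-- ===== Notes on version B (the rewrite author's own statement) =====
-- stated objective: alternative
-- what changed: B replaces A's counting dict plus second pass over the dict with a single scan over the flattened word list that records first occurrences and tests each new word's frequency directly with list.count.
import Mathlib
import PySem

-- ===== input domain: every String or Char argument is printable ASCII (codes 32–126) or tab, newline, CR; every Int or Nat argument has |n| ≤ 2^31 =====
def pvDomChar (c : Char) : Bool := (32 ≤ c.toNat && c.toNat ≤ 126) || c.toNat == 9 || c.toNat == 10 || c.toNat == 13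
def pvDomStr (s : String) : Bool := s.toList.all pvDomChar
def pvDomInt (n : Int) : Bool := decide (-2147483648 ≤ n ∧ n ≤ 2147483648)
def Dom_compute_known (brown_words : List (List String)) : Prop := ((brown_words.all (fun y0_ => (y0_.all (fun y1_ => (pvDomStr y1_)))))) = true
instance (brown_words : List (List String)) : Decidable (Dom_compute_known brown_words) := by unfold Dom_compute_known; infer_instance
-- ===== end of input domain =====

-- B builds the known set in one scan over the flattened words (first occurrences + list.count)
-- instead of A's counting dict followed by a pass over the dict; objective: alternative.

def rare_word_max : Int := 5

-- ===== PORT A =====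
def compute_known (brown_words : List (List String)) : List String :=
  let word_count : PySem.Dict String Int :=
    brown_words.foldl (fun d item =>
      item.foldl (fun d word =>
        if !d.contains word then d.insert word 1
        else d.insert word (d.getD word 0 + 1)) d) PySem.Dict.empty
  word_count.keys.foldl (fun known item =>
    if word_count.getD item 0 > rare_word_max then PySem.Set.add known item else known)
    PySem.Set.empty

-- ===== PORT B =====
def compute_known_alt (brown_words : List (List String)) : List String :=
  let flat : List String := brown_words.foldl (fun acc item => acc ++ item) []
  let st :=
    flat.foldl (fun (st : PySem.Set String × List String) w =>
      if PySem.Set.contains st.1 w then st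
      else (PySem.Set.add st.1 w,
            if (PySem.List.count flat w : Int) > rare_word_max then st.2 ++ [w] else st.2))
      (PySem.Set.empty, [])
  PySem.Set.ofList st.2

-- ===== PRECONDITION & SPEC =====
def Spec_compute_known (brown_words : List (List String)) (out : List String) : Prop := out = compute_known_alt brown_words
instance (brown_words : List (List String)) (out : List String) : Decidable (Spec_compute_known brown_words out) := by unfold Spec_compute_known; infer_instance

-- ===== CLAIM (what is proved, stated in full; the proofs are below) =====
def Claim_equal_compute_known : Prop := ∀ (brown_words : List (List String)), Dom_compute_known brown_words → Spec_compute_known brown_words (compute_known brown_words)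

-- ===== LEMMAS AND PROOFS =====

-- the elements of l not already in s, in first-occurrence order
def pvNews (s l : List String) : List String :=
  match l with
  | [] => []
  | w :: t => if s.contains w then pvNews s t else w :: pvNews (s ++ [w]) t

theorem pvUpdate_eq_append_news (l s : List String) :
    PySem.Set.update s l = s ++ pvNews s l := by
  induction l generalizing s with
  | nil => simp [PySem.Set.update, pvNews]
  | cons w t ih =>
    simp only [PySem.Set.update, List.foldl_cons, pvNews, PySem.Set.add, PySem.Set.contains]
    by_cases h : w ∈ s
    · simp only [h, if_pos, List.contains_eq_mem, decide_true]
      simpa [PySem.Set.update] using ih s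
    · simp only [h, List.contains_eq_mem, decide_false, if_false, Bool.false_eq_true]
      simpa [PySem.Set.update] using ih (s ++ [w])

theorem pvB_fold (p : String → Prop) [DecidablePred p] (l : List String) (s k : List String) :
    l.foldl (fun (st : PySem.Set String × List String) w =>
      if PySem.Set.contains st.1 w then st
      else (PySem.Set.add st.1 w, if p w then st.2 ++ [w] else st.2)) (s, k)
    = (PySem.Set.update s l, k ++ (pvNews s l).filter (fun x => decide (p x))) := by
  induction l generalizing s k with
  | nil => simp [PySem.Set.update, pvNews]
  | cons w t ih =>
    by_cases h : w ∈ s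
    · have hstep : (if PySem.Set.contains ((s, k) : PySem.Set String × List String).1 w then (s, k)
          else (PySem.Set.add (s, k).1 w, if p w then (s, k).2 ++ [w] else (s, k).2)) = (s, k) := by
        simp [PySem.Set.contains, h]
      have hupd : PySem.Set.update s (w :: t) = PySem.Set.update s t := by
        simp [PySem.Set.update, PySem.Set.add, PySem.Set.contains, h]
      have hnews : pvNews s (w :: t) = pvNews s t := by
        simp [pvNews, h]
      rw [List.foldl_cons, hstep, hupd, hnews, ih s k]
    · have hupd : PySem.Set.update s (w :: t) = PySem.Set.update (s ++ [w]) t := by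
        simp [PySem.Set.update, PySem.Set.add, PySem.Set.contains, h]
      have hnews : pvNews s (w :: t) = w :: pvNews (s ++ [w]) t := by
        simp [pvNews, h]
      by_cases hp : p w
      · have hstep : (if PySem.Set.contains ((s, k) : PySem.Set String × List String).1 w then (s, k)
            else (PySem.Set.add (s, k).1 w, if p w then (s, k).2 ++ [w] else (s, k).2))
            = (s ++ [w], k ++ [w]) := by
          simp [PySem.Set.contains, PySem.Set.add, h, hp]
        rw [List.foldl_cons, hstep, hupd, hnews, ih (s ++ [w]) (k ++ [w]), List.filter_cons]
        simp [hp]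
      · have hstep : (if PySem.Set.contains ((s, k) : PySem.Set String × List String).1 w then (s, k)
            else (PySem.Set.add (s, k).1 w, if p w then (s, k).2 ++ [w] else (s, k).2))
            = (s ++ [w], k) := by
          simp [PySem.Set.contains, PySem.Set.add, h, hp]
        rw [List.foldl_cons, hstep, hupd, hnews, ih (s ++ [w]) k, List.filter_cons]
        simp [hp]

theorem pvA_fold (p : String → Prop) [DecidablePred p] (l acc : List String)
    (hnd : l.Nodup) (hacc : ∀ x ∈ l, x ∉ acc) :
    l.foldl (fun s kk => if p kk then PySem.Set.add s kk else s) acc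
    = acc ++ l.filter (fun x => decide (p x)) := by
  induction l generalizing acc with
  | nil => simp
  | cons w t ih =>
    have h2 := List.nodup_cons.mp hnd
    have hw : w ∉ acc := hacc w (by simp)
    have hrest : ∀ x ∈ t, x ∉ acc ++ [w] := by
      intro x hx
      simp only [List.mem_append, List.mem_singleton]
      rintro (hc | rfl)
      · exact hacc x (by simp [hx]) hc
      · exact h2.1 hx
    rw [List.foldl_cons, List.filter_cons]
    by_cases hp : p w
    · have hadd : PySem.Set.add acc w = acc ++ [w] := by
        simp [PySem.Set.add, PySem.Set.contains, hw]
      rw [if_pos hp, hadd, ih (acc ++ [w]) h2.2 hrest]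
      simp [hp]
    · rw [if_neg (by simp [hp]), ih acc h2.2 (fun x hx => hacc x (by simp [hx]))]
      simp [hp]

theorem pvNews_of_disjoint (t : List String) :
    ∀ s : List String, t.Nodup → (∀ x ∈ t, x ∉ s) → pvNews s t = t := by
  induction t with
  | nil => intro s _ _; simp [pvNews]
  | cons a b ih =>
    intro s ht hdisj
    have h2 := List.nodup_cons.mp ht
    have ha : a ∉ s := hdisj a (by simp)
    rw [pvNews, if_neg (by simp [ha])]
    congr 1
    apply ih (s ++ [a]) h2.2
    intro x hx
    simp only [List.mem_append, List.mem_singleton]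
    rintro (hc | rfl)
    · exact hdisj x (by simp [hx]) hc
    · exact h2.1 hx

theorem pv_ofList_nodup (l : List String) (h : l.Nodup) : PySem.Set.ofList l = l := by
  have h1 : PySem.Set.ofList l = PySem.Set.update [] l := rfl
  rw [h1, pvUpdate_eq_append_news, pvNews_of_disjoint l [] h (by simp)]
  simp

-- ===== VERDICT (by name: the statement is the Claim_ definition above) =====
theorem compute_known_spec : Claim_equal_compute_known := by
  intro bw _
  unfold Spec_compute_known compute_known compute_known_alt
  have hstepA : (fun (d : PySem.Dict String Int) word =>
      if !d.contains word then d.insert word 1 else d.insert word (d.getD word 0 + 1))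
      = fun (d : PySem.Dict String Int) word => d.insert word (d.getD word 0 + 1) := by
    funext d w
    by_cases hc : d.contains w
    · simp [hc]
    · have hc' : d.contains w = false := by simpa using hc
      have := PySem.Dict.getD_of_not_contains (d := d) (k := w) (d0 := (0 : Int)) hc'
      simp [hc, this]
  simp only [hstepA]
  rw [show (bw.foldl (fun (d : PySem.Dict String Int) item =>
        item.foldl (fun d word => d.insert word (d.getD word 0 + 1)) d) PySem.Dict.empty)
      = bw.flatten.foldl (fun (d : PySem.Dict String Int) word =>
        d.insert word (d.getD word 0 + 1)) PySem.Dict.empty from List.foldl_flatten.symm]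
  rw [PySem.Dict.foldl_insert_getD_add_one_eq_counter]
  rw [PySem.Dict.keys_counter]
  have hstepK : (fun (known : List String) item =>
      if (PySem.Dict.counter bw.flatten).getD item 0 > rare_word_max
      then PySem.Set.add known item else known)
      = fun (known : List String) item =>
      if ((PySem.List.count bw.flatten item : Int)) > rare_word_max then PySem.Set.add known item else known := by
    funext kn it
    rw [PySem.Dict.getD_counter, ← PySem.List.count_eq]
  simp only [hstepK]
  rw [pvA_fold (fun x => ((PySem.List.count bw.flatten x : Int)) > rare_word_max) (PySem.Set.ofList bw.flatten)
    PySem.Set.empty (PySem.Set.nodup_ofList _) (by simp [PySem.Set.empty])]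
  rw [show (bw.foldl (fun (acc : List String) item => acc ++ item) []) = bw.flatten by
    simpa using PySem.List.foldl_append_eq_flatten (xs := bw) (acc := [])]
  rw [pvB_fold (fun w => ((PySem.List.count bw.flatten w : Int)) > rare_word_max) bw.flatten
    PySem.Set.empty []]
  have hnews : pvNews PySem.Set.empty bw.flatten = PySem.Set.ofList bw.flatten := by
    have := pvUpdate_eq_append_news bw.flatten []
    simpa [PySem.Set.empty] using this.symm
  rw [hnews]
  simp only [List.nil_append]
  rw [pv_ofList_nodup _ (List.Nodup.filter _ (PySem.Set.nodup_ofList _))]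
  simp [PySem.Set.empty]
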